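-- pv_equiv track=rewrite | github.com/wangsun39/leetcode | all-code/1701-1800/1703minMoves.py | minMoves
-- ===== SOURCE A (Python) =====
-- from typing import List
--
-- def minMoves(nums: List[int], k: int) -> int:
--     # 2023/2/8
--     # 用灵神的解法 https://leetcode.cn/problems/minimum-adjacent-swaps-for-k-consecutive-ones/solution/tu-jie-zhuan-huan-cheng-zhong-wei-shu-ta-iz4v/
--     pi = []  # pi 记录所有1下标的前j
--     j = 0
--     for i, x in enumerate(nums):
--         if x == 1:
--             pi.append(i - j)
--             j += 1
--     n = len(pi)
--     if k & 1:
--         mid = (k - 1) // 2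
--         l = sum(pi[mid] - x for x in pi[:mid])
--         r = sum(x - pi[mid] for x in pi[mid + 1: k])
--         ans = cur = l + r
--         begin, end = 0, k - 1
--         for _ in range(n - k):
--             cur += (-(pi[mid] - pi[begin]) + (pi[end + 1] - pi[mid + 1]))
--             ans = min(ans, cur)
--             begin += 1
--             end += 1
--             mid += 1
--     else:
--         mid = (k - 1) // 2
--         l = sum(pi[mid] - x for x in pi[:mid])
--         r = sum(x - pi[mid] for x in pi[mid + 1: k])
--         ans = cur = l + r
--         begin, end = 0, k - 1
--         for _ in range(n - k):
--             cur += (-(pi[mid] - pi[begin]) + (pi[end + 1] - pi[mid + 1]) - (pi[mid + 1] -pi[mid]))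
--             ans = min(ans, cur)
--             begin += 1
--             end += 1
--             mid += 1
--     return ans
-- ===== SOURCE B (Python) =====
-- def minMoves(nums, k):
--     pi = []
--     j = 0
--     for i, x in enumerate(nums):
--         if x == 1:
--             pi.append(i - j)
--             j += 1
--     n = len(pi)
--     P = [0]
--     for v in pi:
--         P.append(P[-1] + v)
--     ans = None  # None until the first window; no window at all (fewer than k ones) costs nothing
--     for begin in range(n - k + 1):
--         end = begin + k - 1
--         mid = begin + (k - 1) // 2
--         cost = pi[mid] * (mid - begin) - (P[mid] - P[begin]) \
--              + (P[end + 1] - P[mid + 1]) - pi[mid] * (end - mid)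
--         if ans is None or cost < ans:
--             ans = cost
--     return 0 if ans is None else ans
-- ===== Notes on version B (the rewrite author's own statement) =====
-- stated objective: simpler
-- what changed: Replaces A's parity-split incremental delta accumulator (cur updated window to window) with a prefix-sum table and an independent closed-form cost per window start, taking a running minimum in one uniform loop.
-- outside the precondition, e.g. on minMoves([1, 0, 1], 3): A returns 1, B returns 0; on minMoves([1, 0, 1], 0): A returns 1, B returns -2; on minMoves([1, 1, 1], -1): A raises IndexError, B raises IndexError
import Mathlib
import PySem

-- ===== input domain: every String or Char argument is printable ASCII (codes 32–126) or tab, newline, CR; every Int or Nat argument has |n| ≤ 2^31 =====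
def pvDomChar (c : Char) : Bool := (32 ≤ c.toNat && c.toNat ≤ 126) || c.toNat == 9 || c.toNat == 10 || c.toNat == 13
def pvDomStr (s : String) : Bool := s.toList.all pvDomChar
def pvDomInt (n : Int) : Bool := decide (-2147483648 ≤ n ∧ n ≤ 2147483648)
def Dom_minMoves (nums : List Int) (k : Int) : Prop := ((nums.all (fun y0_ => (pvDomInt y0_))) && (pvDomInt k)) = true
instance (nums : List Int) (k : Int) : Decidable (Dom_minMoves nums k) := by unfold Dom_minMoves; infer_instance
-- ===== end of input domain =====

-- B replaces A's parity-split incremental delta accumulator by one prefix-sum table and an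
-- independent closed-form cost per window (objective: simpler; return value only).

-- ===== PORT A =====
-- pi-building loop shared by both Pythons: indices of the 1s minus their rank
def pvOnesIdx (nums : List Int) : List Int :=
  ((PySem.List.enumerate nums).foldl
    (fun (st : List Int × Int) ix =>
      if ix.2 = 1 then (st.1 ++ [ix.1 - st.2], st.2 + 1) else st)
    ([], 0)).1

def minMoves (nums : List Int) (k : Int) : Int :=
  let pi := pvOnesIdx nums
  let n : Int := pi.length
  if PySem.Int.band k 1 ≠ 0 then
    let mid := PySem.Int.floordiv (k - 1) 2
    let l := ((PySem.List.slice pi none (some mid)).map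
                (fun x => PySem.List.pyGetD pi mid 0 - x)).sum
    let r := ((PySem.List.slice pi (some (mid + 1)) (some k)).map
                (fun x => x - PySem.List.pyGetD pi mid 0)).sum
    let st := (PySem.List.pyRange 0 (n - k) 1).foldl
      (fun (st : Int × Int × Int × Int × Int) _ =>
        let cur := st.1 + (-(PySem.List.pyGetD pi st.2.2.2.2 0 - PySem.List.pyGetD pi st.2.2.1 0)
            + (PySem.List.pyGetD pi (st.2.2.2.1 + 1) 0 - PySem.List.pyGetD pi (st.2.2.2.2 + 1) 0))
        (cur, min st.2.1 cur, st.2.2.1 + 1, st.2.2.2.1 + 1, st.2.2.2.2 + 1))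
      (l + r, l + r, 0, k - 1, mid)
    st.2.1
  else
    let mid := PySem.Int.floordiv (k - 1) 2
    let l := ((PySem.List.slice pi none (some mid)).map
                (fun x => PySem.List.pyGetD pi mid 0 - x)).sum
    let r := ((PySem.List.slice pi (some (mid + 1)) (some k)).map
                (fun x => x - PySem.List.pyGetD pi mid 0)).sum
    let st := (PySem.List.pyRange 0 (n - k) 1).foldl
      (fun (st : Int × Int × Int × Int × Int) _ =>
        let cur := st.1 + (-(PySem.List.pyGetD pi st.2.2.2.2 0 - PySem.List.pyGetD pi st.2.2.1 0)
            + (PySem.List.pyGetD pi (st.2.2.2.1 + 1) 0 - PySem.List.pyGetD pi (st.2.2.2.2 + 1) 0)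
            - (PySem.List.pyGetD pi (st.2.2.2.2 + 1) 0 - PySem.List.pyGetD pi st.2.2.2.2 0))
        (cur, min st.2.1 cur, st.2.2.1 + 1, st.2.2.2.1 + 1, st.2.2.2.2 + 1))
      (l + r, l + r, 0, k - 1, mid)
    st.2.1

-- ===== PORT B =====
def minMoves_alt (nums : List Int) (k : Int) : Int :=
  let pi := pvOnesIdx nums
  let n : Int := pi.length
  let P := pi.foldl (fun P v => P ++ [PySem.List.pyGetD P (-1) 0 + v]) [(0 : Int)]
  let ans := (PySem.List.pyRange 0 (n - k + 1) 1).foldl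
    (fun (ans : Option Int) b_ =>
      let e_ := b_ + k - 1
      let m_ := b_ + PySem.Int.floordiv (k - 1) 2
      let cost := PySem.List.pyGetD pi m_ 0 * (m_ - b_)
          - (PySem.List.pyGetD P m_ 0 - PySem.List.pyGetD P b_ 0)
          + (PySem.List.pyGetD P (e_ + 1) 0 - PySem.List.pyGetD P (m_ + 1) 0)
          - PySem.List.pyGetD pi m_ 0 * (e_ - m_)
      match ans with
      | none => some cost
      | some a => if cost < a then some cost else some a)
    none
  -- '0 if ans is None else ans'
  ans.getD 0

-- ===== PRECONDITION & SPEC =====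
-- Pre_ excludes k < 1 (Python's negative-index wraparound makes A's value there accidental) and,
-- when nums does contain 1s, k greater than their number (A then returns the cost of a truncated
-- window that its lazily-evaluated generator sums happen to produce, or raises IndexError).
def Pre_minMoves (nums : List Int) (k : Int) : Prop :=
  1 ≤ k ∧ (k ≤ (nums.count 1 : Int) ∨ (nums.count 1 : Int) = 0)
instance (nums : List Int) (k : Int) : Decidable (Pre_minMoves nums k) := by
  unfold Pre_minMoves; infer_instance

def pvWitness_minMoves : List Int × Int := ([1, 0, 1, 1, 0, 1], 3)

def Spec_minMoves (nums : List Int) (k : Int) (out : Int) : Prop := out = minMoves_alt nums k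
instance (nums : List Int) (k : Int) (out : Int) : Decidable (Spec_minMoves nums k out) := by
  unfold Spec_minMoves; infer_instance

-- ===== CLAIM (what is proved, stated in full; the proofs are below) =====
def Claim_equal_minMoves : Prop := ∀ (nums : List Int) (k : Int), Dom_minMoves nums k → Pre_minMoves nums k → Spec_minMoves nums k (minMoves nums k)

-- ===== LEMMAS AND PROOFS =====

-- prefix sums of pi, at an Int index (clamped below at 0)
def pvS (pi : List Int) (i : Int) : Int := (pi.take i.toNat).sum

-- closed-form cost of the window starting at b (median offset h, window length k), in pvS terms
def pvG (pi : List Int) (k h b : Int) : Int :=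
  (pvS pi (b+h+1) - pvS pi (b+h)) * h - (pvS pi (b+h) - pvS pi b)
  + (pvS pi (b+k) - pvS pi (b+h+1)) - (pvS pi (b+h+1) - pvS pi (b+h)) * (k-1-h)

-- running minimum of g 0 .. g t
def pvAns (g : Int → Int) : Nat → Int
  | 0 => g 0
  | (t+1) => min (pvAns g t) (g (t+1))

theorem pvOnesIdx_len_aux (l : List Int) : ∀ (s : Int) (acc : List Int) (j : Int),
    (((PySem.List.enumerate l s).foldl
      (fun (st : List Int × Int) ix =>
        if ix.2 = 1 then (st.1 ++ [ix.1 - st.2], st.2 + 1) else st) (acc, j)).1).length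
    = acc.length + l.count 1 := by
  induction l with
  | nil => intro s acc j; simp [PySem.List.enumerate]
  | cons x t ih =>
    intro s acc j
    rw [PySem.List.enumerate_cons, List.foldl_cons, List.count_cons]
    by_cases hx : x = 1
    · simp [hx, ih]
      omega
    · simp only [if_neg hx, ih]
      simp [hx]

theorem length_pvOnesIdx (nums : List Int) : (pvOnesIdx nums).length = nums.count 1 := by
  simpa using pvOnesIdx_len_aux nums 0 [] 0

theorem buildP_aux (l : List Int) : ∀ (acc : List Int) (s : Int),
    l.foldl (fun P v => P ++ [PySem.List.pyGetD P (-1) 0 + v]) (acc ++ [s])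
    = (acc ++ [s]) ++ (List.range l.length).map (fun i => s + (l.take (i+1)).sum) := by
  induction l with
  | nil => intro acc s; simp
  | cons v t ih =>
    intro acc s
    rw [List.foldl_cons, PySem.List.pyGetD_neg_one_append_singleton]
    have h2 : (acc ++ [s]) ++ [s + v] = (acc ++ [s]) ++ [s + v] := rfl
    rw [show (acc ++ [s]) ++ [s + v] = ((acc ++ [s]) ++ [s + v]) from rfl]
    rw [ih ((acc ++ [s])) (s + v)]
    simp [List.range_succ_eq_map, List.map_map, Function.comp_def, add_assoc]

theorem PgetD (pi : List Int) (i : Int) (h0 : 0 ≤ i) (h1 : i ≤ (pi.length : Int)) :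
    PySem.List.pyGetD (pi.foldl (fun P v => P ++ [PySem.List.pyGetD P (-1) 0 + v]) [(0:Int)]) i 0
    = pvS pi i := by
  have hb := buildP_aux pi [] 0
  simp only [List.nil_append] at hb
  rw [hb]
  set L : List Int := [0] ++ (List.range pi.length).map (fun j => 0 + (pi.take (j+1)).sum) with hL
  have hlen : L.length = pi.length + 1 := by simp [hL]
  rw [PySem.List.pyGetD_eq_getElem L 0 h0 (by rw [hlen]; push_cast; omega)]
  have hL' : L = 0 :: (List.range pi.length).map (fun j => 0 + (pi.take (j+1)).sum) := by
    rw [hL]; rfl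
  have key : ∀ (j : Nat) (hj : j < L.length), L[j] = (pi.take j).sum := by
    intro j hj
    cases j with
    | zero => simp [hL']
    | succ jj =>
      have hjj : jj < pi.length := by omega
      have hg : L[jj+1]'hj = ((List.range pi.length).map (fun j => 0 + (pi.take (j+1)).sum))[jj]'(by simpa using hjj) := by
        rw [getElem_congr hL' rfl (by simpa [hL'] using hj)]
        simp
      rw [hg, List.getElem_map, List.getElem_range]
      simp
  rw [key i.toNat (by omega)]
  rfl

theorem piGetD (pi : List Int) (i : Int) (h0 : 0 ≤ i) (h1 : i < (pi.length : Int)) :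
    PySem.List.pyGetD pi i 0 = pvS pi (i+1) - pvS pi i := by
  rw [PySem.List.pyGetD_eq_getElem pi 0 h0 (by omega)]
  have hi : i.toNat < pi.length := by omega
  have := List.sum_take_succ pi i.toNat hi
  simp only [pvS]
  have hti : (i+1).toNat = i.toNat + 1 := by omega
  rw [hti, this]
  ring

theorem sum_map_sub_left (c : Int) (L : List Int) :
    (L.map (fun x => c - x)).sum = c * L.length - L.sum := by
  induction L with
  | nil => simp
  | cons x t ih => simp [ih]; ring

theorem sum_map_sub_right (c : Int) (L : List Int) :
    (L.map (fun x => x - c)).sum = L.sum - c * L.length := by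
  induction L with
  | nil => simp
  | cons x t ih => simp [ih]; ring

theorem sum_drop_take (pi : List Int) (a b : Nat) (hab : a ≤ b) :
    ((pi.drop a).take (b - a)).sum = (pi.take b).sum - (pi.take a).sum := by
  have h : pi.take b = pi.take a ++ (pi.drop a).take (b - a) := by
    rw [← List.take_add]; congr 1; omega
  rw [h]; simp

theorem gstep_odd (pi : List Int) (k h t : Int) (hk : k = 2*h+1) (hh : 0 ≤ h)
    (h0 : 0 ≤ t) (hub : t + k < (pi.length : Int)) :
    pvG pi k h (t+1) = pvG pi k h t +
      (-(PySem.List.pyGetD pi (h+t) 0 - PySem.List.pyGetD pi t 0)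
       + (PySem.List.pyGetD pi ((k-1+t) + 1) 0 - PySem.List.pyGetD pi ((h+t) + 1) 0)) := by
  rw [piGetD pi (h+t) (by omega) (by omega),
      piGetD pi t h0 (by omega),
      piGetD pi ((k-1+t)+1) (by omega) (by omega),
      piGetD pi ((h+t)+1) (by omega) (by omega)]
  simp only [pvG]
  subst hk
  ring_nf

theorem gstep_even (pi : List Int) (k h t : Int) (hk : k = 2*h+2) (hh : 0 ≤ h)
    (h0 : 0 ≤ t) (hub : t + k < (pi.length : Int)) :
    pvG pi k h (t+1) = pvG pi k h t +
      (-(PySem.List.pyGetD pi (h+t) 0 - PySem.List.pyGetD pi t 0)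
       + (PySem.List.pyGetD pi ((k-1+t) + 1) 0 - PySem.List.pyGetD pi ((h+t) + 1) 0)
       - (PySem.List.pyGetD pi ((h+t) + 1) 0 - PySem.List.pyGetD pi (h+t) 0)) := by
  rw [piGetD pi (h+t) (by omega) (by omega),
      piGetD pi t h0 (by omega),
      piGetD pi ((k-1+t)+1) (by omega) (by omega),
      piGetD pi ((h+t)+1) (by omega) (by omega)]
  simp only [pvG]
  subst hk
  ring_nf

theorem if_lt_eq_min (a c : Int) : (if c < a then c else a) = min a c := by
  rcases lt_or_ge c a with hlt | hge <;> simp [min_def] <;> omega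

theorem loop_inv (g : Int → Int) (upd : Int × Int × Int × Int × Int → Int) (k h T : Int)
    (hupd : ∀ (c a t : Int), 0 ≤ t → t < T → upd (c, a, t, k - 1 + t, h + t) = c + (g (t+1) - g t)) :
    ∀ t : Nat, (t : Int) ≤ T →
    (PySem.List.pyRange 0 (t : Int) 1).foldl
      (fun st _ => (upd st, min st.2.1 (upd st), st.2.2.1 + 1, st.2.2.2.1 + 1, st.2.2.2.2 + 1))
      (g 0, g 0, 0, k - 1, h)
    = (g t, pvAns g t, (t : Int), k - 1 + t, h + t) := by
  intro t
  induction t with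
  | zero =>
    intro _
    rw [PySem.List.pyRange_one_eq_nil (by norm_num)]
    simp [pvAns]
  | succ t ih =>
    intro hle
    have hle' : ((t:Int)+1) ≤ T := by push_cast at hle; omega
    have ht : (t:Int) ≤ T := by omega
    push_cast
    rw [PySem.List.pyRange_one_succ_right (by positivity), List.foldl_append, ih ht]
    simp only [List.foldl_cons, List.foldl_nil]
    have hst : upd (g t, pvAns g t, (t:Int), k-1+(t:Int), h+(t:Int)) = g t + (g ((t:Int)+1) - g t) :=
      hupd _ _ _ (by positivity) (by omega)
    rw [hst]
    have hgg : g (t:Int) + (g ((t:Int) + 1) - g (t:Int)) = g ((t:Int)+1) := by ring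
    rw [hgg]
    simp only [Prod.mk.injEq, pvAns]
    refine ⟨trivial, trivial, ?_, ?_, ?_⟩ <;> push_cast <;> try ring

theorem loopB_inv (g F : Int → Int) (T : Int) (hF : ∀ b, 0 ≤ b → b ≤ T → F b = g b) :
    ∀ t : Nat, (t : Int) ≤ T →
    (PySem.List.pyRange 0 ((t : Int)+1) 1).foldl
      (fun (ans : Option Int) b_ =>
        match ans with
        | none => some (F b_)
        | some a => if F b_ < a then some (F b_) else some a) none
    = some (pvAns g t) := by
  intro t
  induction t with
  | zero =>
    intro h0
    rw [show ((0:Nat):Int) + 1 = 0 + 1 by norm_num, PySem.List.pyRange_one_singleton 0]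
    simp [pvAns, hF 0 le_rfl h0]
  | succ t ih =>
    intro hle
    have ht : (t:Int) ≤ T := by push_cast at hle; omega
    push_cast
    rw [PySem.List.pyRange_one_succ_right (by positivity), List.foldl_append]
    push_cast at ih
    rw [ih ht]
    simp only [List.foldl_cons, List.foldl_nil]
    rw [hF ((t:Int)+1) (by positivity) (by push_cast at hle; omega)]
    rw [show (if g ((t:Int)+1) < pvAns g t then some (g ((t:Int)+1)) else some (pvAns g t))
          = some (min (pvAns g t) (g ((t:Int)+1))) from by rw [← apply_ite some, if_lt_eq_min]]
    simp [pvAns]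

theorem pvS_zero (pi : List Int) : pvS pi 0 = 0 := rfl

theorem costB (pi : List Int) (k h b : Int) (hh0 : 0 ≤ h) (hhk : h ≤ k - 1) (hk1 : 1 ≤ k)
    (hb0 : 0 ≤ b) (hbk : b + k ≤ (pi.length : Int)) :
    PySem.List.pyGetD pi (b + h) 0 * (b + h - b)
      - (PySem.List.pyGetD (pi.foldl (fun P v => P ++ [PySem.List.pyGetD P (-1) 0 + v]) [(0:Int)]) (b + h) 0
         - PySem.List.pyGetD (pi.foldl (fun P v => P ++ [PySem.List.pyGetD P (-1) 0 + v]) [(0:Int)]) b 0)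
      + (PySem.List.pyGetD (pi.foldl (fun P v => P ++ [PySem.List.pyGetD P (-1) 0 + v]) [(0:Int)]) (b + k - 1 + 1) 0
         - PySem.List.pyGetD (pi.foldl (fun P v => P ++ [PySem.List.pyGetD P (-1) 0 + v]) [(0:Int)]) (b + h + 1) 0)
      - PySem.List.pyGetD pi (b + h) 0 * (b + k - 1 - (b + h))
    = pvG pi k h b := by
  rw [piGetD pi (b+h) (by omega) (by omega)]
  rw [PgetD pi (b+h) (by omega) (by omega),
      PgetD pi b hb0 (by omega),
      PgetD pi (b+k-1+1) (by omega) (by omega),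
      PgetD pi (b+h+1) (by omega) (by omega)]
  simp only [pvG]
  ring_nf

theorem init_lr (pi : List Int) (k h : Int) (hh0 : 0 ≤ h) (hhk : h ≤ k - 1) (hk1 : 1 ≤ k)
    (hkn : k ≤ (pi.length : Int)) :
    ((PySem.List.slice pi none (some h)).map (fun x => PySem.List.pyGetD pi h 0 - x)).sum
      + ((PySem.List.slice pi (some (h + 1)) (some k)).map (fun x => x - PySem.List.pyGetD pi h 0)).sum
    = pvG pi k h 0 := by
  rw [PySem.List.slice_to pi hh0, PySem.List.slice_toNat pi (by omega) (by omega)]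
  rw [sum_map_sub_left, sum_map_sub_right]
  rw [piGetD pi h hh0 (by omega)]
  have hlen1 : ((pi.take h.toNat).length : Int) = h := by
    simp [List.length_take]; omega
  have hlen2 : ((((pi.drop (h+1).toNat).take (k.toNat - (h+1).toNat)).length : Int)) = k - (h + 1) := by
    simp [List.length_take, List.length_drop]; omega
  rw [hlen1, hlen2, sum_drop_take pi _ _ (by omega)]
  rw [show (pi.take h.toNat).sum = pvS pi h from rfl,
      show (pi.take k.toNat).sum = pvS pi k from rfl,
      show (pi.take (h+1).toNat).sum = pvS pi (h+1) from rfl]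
  simp only [pvG, pvS_zero]
  ring_nf

-- ===== VERDICT (by name: the statement is the Claim_ definition above) =====
theorem minMoves_spec : Claim_equal_minMoves := by
  intro nums k _hdom hpre
  obtain ⟨hk1, hor⟩ := hpre
  unfold Spec_minMoves
  have hlen : ((pvOnesIdx nums).length : Int) = ((nums.count 1 : Nat) : Int) := by
    exact_mod_cast congrArg (Nat.cast : Nat → Int) (length_pvOnesIdx nums)
  set pi := pvOnesIdx nums with hpidef
  have hhe : PySem.Int.floordiv (k-1) 2 = (k-1)/2 := PySem.Int.floordiv_eq_ediv_of_pos (by norm_num)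
  set h : Int := PySem.Int.floordiv (k-1) 2 with hdef
  have hh0 : 0 ≤ h := by omega
  have hhk : h ≤ k - 1 := by omega
  rcases hor with hk2 | hn0
  case inr =>
    have hpinil : pi = [] := by
      have hl := length_pvOnesIdx nums
      rw [← hpidef] at hl
      have : pi.length = 0 := by omega
      exact List.eq_nil_of_length_eq_zero this
    have hB0 : minMoves_alt nums k = 0 := by
      simp only [minMoves_alt]
      rw [← hpidef, hpinil]
      rw [PySem.List.pyRange_one_eq_nil (by simp; omega)]
      simp
    have hA0 : minMoves nums k = 0 := by
      simp only [minMoves]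
      rw [← hpidef, ← hdef, hpinil]
      simp [PySem.List.slice_to ([] : List Int) hh0,
            PySem.List.slice_toNat ([] : List Int) (by omega : (0:Int) ≤ h + 1) (by omega : (0:Int) ≤ k),
            PySem.List.pyRange_one_eq_nil (by omega : (-k : Int) ≤ 0)]
    rw [hA0, hB0]
  have hkn : k ≤ (pi.length : Int) := by rw [hlen]; exact_mod_cast hk2
  set T : Int := (pi.length : Int) - k with hTdef
  have hT0 : 0 ≤ T := by omega
  set t0 : Nat := T.toNat with ht0def
  have htT : (t0 : Int) = T := by omega
  set g : Int → Int := pvG pi k h with hgdef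
  -- B side: the window loop computes the running minimum of g
  have hB : minMoves_alt nums k = pvAns g t0 := by
    simp only [minMoves_alt]
    rw [← hpidef, ← hdef]
    have hrange : (pi.length : Int) - k + 1 = (t0 : Int) + 1 := by omega
    rw [hrange]
    have hloop := loopB_inv g
      (fun b_ =>
        PySem.List.pyGetD pi (b_ + h) 0 * (b_ + h - b_)
          - (PySem.List.pyGetD (pi.foldl (fun P v => P ++ [PySem.List.pyGetD P (-1) 0 + v]) [(0:Int)]) (b_ + h) 0
             - PySem.List.pyGetD (pi.foldl (fun P v => P ++ [PySem.List.pyGetD P (-1) 0 + v]) [(0:Int)]) b_ 0)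
          + (PySem.List.pyGetD (pi.foldl (fun P v => P ++ [PySem.List.pyGetD P (-1) 0 + v]) [(0:Int)]) (b_ + k - 1 + 1) 0
             - PySem.List.pyGetD (pi.foldl (fun P v => P ++ [PySem.List.pyGetD P (-1) 0 + v]) [(0:Int)]) (b_ + h + 1) 0)
          - PySem.List.pyGetD pi (b_ + h) 0 * (b_ + k - 1 - (b_ + h)))
      T
      (fun b hb0 hbT => costB pi k h b hh0 hhk hk1 hb0 (by omega))
      t0 (le_of_eq htT)
    exact congrArg (fun o => o.getD 0) hloop
  -- A side: the delta loop maintains g and its running minimum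
  have hA : minMoves nums k = pvAns g t0 := by
    simp only [minMoves]
    rw [← hpidef, ← hdef]
    have hrange : (pi.length : Int) - k = (t0 : Int) := by omega
    by_cases hpar : PySem.Int.band k 1 ≠ 0
    · -- odd k
      have hk2h : k = 2 * ((k-1)/2) + 1 := by
        have hb1 := PySem.Int.band_one k
        rw [PySem.Int.mod_eq_emod_of_pos (by norm_num)] at hb1
        omega
      have hkh : k = 2 * h + 1 := by omega
      rw [if_pos hpar, hrange]
      rw [init_lr pi k h hh0 hhk hk1 hkn]
      have hloop := loop_inv g
        (fun st => st.1 + (-(PySem.List.pyGetD pi st.2.2.2.2 0 - PySem.List.pyGetD pi st.2.2.1 0)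
            + (PySem.List.pyGetD pi (st.2.2.2.1 + 1) 0 - PySem.List.pyGetD pi (st.2.2.2.2 + 1) 0)))
        k h T
        (fun c a t htl htu => by
          simp only
          rw [hgdef]
          rw [gstep_odd pi k h t hkh hh0 htl (by omega)]
          ring)
        t0 (le_of_eq htT)
      exact congrArg (fun st => st.2.1) hloop
    · -- even k
      have hk2h : k = 2 * ((k-1)/2) + 2 := by
        have hb1 := PySem.Int.band_one k
        rw [PySem.Int.mod_eq_emod_of_pos (by norm_num)] at hb1
        rw [not_not] at hpar
        omega
      have hkh : k = 2 * h + 2 := by omega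
      rw [if_neg hpar, hrange]
      rw [init_lr pi k h hh0 hhk hk1 hkn]
      have hloop := loop_inv g
        (fun st => st.1 + (-(PySem.List.pyGetD pi st.2.2.2.2 0 - PySem.List.pyGetD pi st.2.2.1 0)
            + (PySem.List.pyGetD pi (st.2.2.2.1 + 1) 0 - PySem.List.pyGetD pi (st.2.2.2.2 + 1) 0)
            - (PySem.List.pyGetD pi (st.2.2.2.2 + 1) 0 - PySem.List.pyGetD pi st.2.2.2.2 0)))
        k h T
        (fun c a t htl htu => by
          simp only
          rw [hgdef]
          rw [gstep_even pi k h t hkh hh0 htl (by omega)]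
          ring)
        t0 (le_of_eq htT)
      exact congrArg (fun st => st.2.1) hloop
  rw [hA, hB]
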